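-- pv_equiv track=rewrite | github.com/hahyuning/Coding-test-study | problem_solving/2021/210814 + t/210814_t3.py | solution
-- ===== SOURCE A (Python) =====
-- from collections import deque
--
-- def solution(csv_string, keyword):
--     answer = 0
--     csv_list = csv_string.split("\n")
--     team_list = csv_list[1:]
--     n = len(csv_list)
--
--     names = dict()
--     graph = [[] for _ in range(n + 1)]
--     numbers = [0] * (n + 1)
--
--     for x in team_list:
--         tmp = x.split(",")
--
--         id, name, parent_id, num = tmp
--         id = int(id)
--         num = int(num)
--         names[name] = id
--         numbers[id] = num
--
--         if id == 1:
--             continue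
--         parent_id = int(parent_id)
--         graph[parent_id].append(id)
--
--     res = 0
--     check = [False] * (n + 1)
--     for x in names:
--         if keyword in x and not check[names[x]]:
--
--             q = deque()
--             q.append(names[x])
--             check[names[x]] = True
--
--             while q:
--                 now = q.popleft()
--                 res += numbers[now]
--                 for nxt in graph[now]:
--                     if not check[nxt]:
--                         check[nxt] = True
--                         q.append(nxt)
--
--     return (res if res != 0 else -1)
-- ===== SOURCE B (Python) =====
-- def solution(csv_string, keyword):
--     rows = [line.split(",") for line in csv_string.split("\n")[1:]]
--     n = len(csv_string.split("\n"))
--     fields = [(int(i), name, p, int(num)) for i, name, p, num in rows]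
--     numbers = {i: num for i, _, _, num in fields}
--     edges = [(int(p), i) for i, _, p, _ in fields if i != 1]
--     marked = {i for i, name, _, _ in fields if keyword in name}
--     for _ in range(n):
--         changed = False
--         for p, c in edges:
--             if p in marked and c not in marked:
--                 marked.add(c)
--                 changed = True
--         if not changed:
--             break
--     total = sum(numbers[i] for i in marked)
--     return total if total != 0 else -1
-- ===== Notes on version B (the rewrite author's own statement) =====
-- stated objective: alternative
-- what changed: Replaces A's per-matching-name BFS with a shared visited array by comprehension-style parsing into a flat edge list plus an iterate-until-no-change relaxation pass that propagates the keyword mark from parents to children, then one sum over the marked set.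
-- outside the precondition, e.g. on solution('h\n-1,a,1,3\n3,b,1,4', 'a'): A returns 4, B returns 3; on solution('h\n1,a,0,5\n2,a,1,7', 'a'): A returns 7, B returns 12
import Mathlib
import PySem

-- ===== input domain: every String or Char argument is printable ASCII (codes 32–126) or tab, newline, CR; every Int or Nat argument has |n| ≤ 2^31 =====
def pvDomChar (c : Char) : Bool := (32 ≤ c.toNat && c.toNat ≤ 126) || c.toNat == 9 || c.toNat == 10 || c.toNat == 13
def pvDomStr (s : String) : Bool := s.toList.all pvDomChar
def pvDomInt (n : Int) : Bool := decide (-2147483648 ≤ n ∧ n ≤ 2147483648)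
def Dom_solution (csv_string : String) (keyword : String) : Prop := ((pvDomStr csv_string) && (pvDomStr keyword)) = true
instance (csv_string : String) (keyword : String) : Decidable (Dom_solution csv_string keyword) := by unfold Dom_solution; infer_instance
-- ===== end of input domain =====

-- B replaces A's per-matching-name BFS (shared visited array) by comprehension-style parsing
-- into a flat edge list plus an iterate-until-no-change parent→child mark propagation
-- ("alternative" objective: structurally different, similar cost).


-- ===== PORT A =====

/-- One iteration of A's building loop over `team_list`; `none` exactly where the Python raises
(wrong field count → ValueError, `int(...)` → ValueError, out-of-range index → IndexError;
`pySet?`/`pyGet?` keep Python's negative-index wraparound). State is `(names, graph, numbers)`. -/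
def buildRowA (st : PySem.Dict String Int × List (List Int) × List Int) (x : String) :
    Option (PySem.Dict String Int × List (List Int) × List Int) :=
  match PySem.Str.split? x "," with
  | some [idS, nameS, parentS, numS] =>
    match PySem.Int.ofStr? idS with
    | none => none
    | some id =>
      match PySem.Int.ofStr? numS with
      | none => none
      | some num =>
        let names := st.1.insert nameS id
        match PySem.List.pySet? st.2.2 id num with
        | none => none
        | some numbers =>
          if id = 1 then some (names, st.2.1, numbers)
          else
            match PySem.Int.ofStr? parentS with
            | none => none
            | some p =>
              match PySem.List.pyGet? st.2.1 p with
              | none => none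
              | some row =>
                match PySem.List.pySet? st.2.1 p (row ++ [id]) with
                | none => none
                | some graph => some (names, graph, numbers)
  | _ => none

def buildA : List String → (PySem.Dict String Int × List (List Int) × List Int) →
    Option (PySem.Dict String Int × List (List Int) × List Int)
  | [], st => some st
  | x :: xs, st =>
    match buildRowA st x with
    | none => none
    | some st' => buildA xs st'

/-- Body of `for nxt in graph[now]: if not check[nxt]: check[nxt] = True; q.append(nxt)`.
`pyGetD _ _ true` reads `check[nxt]` (default `true` only where Python raises IndexError,
excluded by `Pre_solution`). -/
def bfsStepA (st : List Bool × List Int) (nxt : Int) : List Bool × List Int :=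
  if PySem.List.pyGetD st.1 nxt true = false then (PySem.List.pySetD st.1 nxt true, st.2 ++ [nxt])
  else st

/-- Each marking in `bfsStepA` flips one `false` entry to `true` and appends one element:
`count false + queue length` is preserved (termination measure for `bfsA`). -/
theorem bfsStepA_fold_measure (kids : List Int) (check : List Bool) (qa : List Int) :
    (kids.foldl bfsStepA (check, qa)).1.count false + (kids.foldl bfsStepA (check, qa)).2.length
      = check.count false + qa.length := by
  induction kids generalizing check qa with
  | nil => rfl
  | cons k ks ih =>
    simp only [List.foldl_cons]
    by_cases h : PySem.List.pyGetD check k true = false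
    · rw [show bfsStepA (check, qa) k = (PySem.List.pySetD check k true, qa ++ [k]) by
        simp [bfsStepA, h]]
      rw [ih]
      -- the read returned `false`, so the index resolves and points at a `false` entry
      have hres : ∃ j, PySem.List.pyIdx? check.length k = some j ∧ check[j]? = some false := by
        simp only [PySem.List.pyGetD, PySem.List.pyGet?] at h
        cases hidx : PySem.List.pyIdx? check.length k with
        | none => rw [hidx] at h; simp at h
        | some j =>
          rw [hidx] at h
          simp only [Option.bind_some] at h
          cases hg : check[j]? with
          | none => rw [hg] at h; simp at h
          | some b => rw [hg] at h; simp at h; exact ⟨j, rfl, by rw [hg, h]⟩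
      obtain ⟨j, hidx, hj⟩ := hres
      have hjlt : j < check.length := by
        have := List.getElem?_eq_some_iff.mp hj; exact this.1
      have hset : PySem.List.pySetD check k true = check.set j true := by
        simp [PySem.List.pySetD, PySem.List.pySet?, hidx]
      rw [hset]
      have hgetj : check[j] = false := by
        have := List.getElem?_eq_some_iff.mp hj; exact this.2
      have hcount : (check.set j true).count false + 1 = check.count false := by
        have hpos : 0 < check.count false :=
          List.count_pos_iff.mpr (hgetj ▸ List.getElem_mem hjlt)
        rw [List.count_set hjlt, hgetj]
        simp; omega
      simp only [List.length_append, List.length_cons, List.length_nil]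
      omega
    · rw [show bfsStepA (check, qa) k = (check, qa) by simp [bfsStepA, h]]
      exact ih check qa

/-- A's inner BFS `while q:` loop; state `(q, check, res)`. -/
def bfsA (graph : List (List Int)) (numbers : List Int) :
    List Int → List Bool → Int → List Bool × Int
  | [], check, res => (check, res)
  | now :: rest, check, res =>
    let res' := res + PySem.List.pyGetD numbers now 0
    let st := (PySem.List.pyGetD graph now []).foldl bfsStepA (check, rest)
    bfsA graph numbers st.2 st.1 res'
termination_by q check _ => check.count false + q.length
decreasing_by
  have := bfsStepA_fold_measure (PySem.List.pyGetD graph now []) check rest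
  simp_all

def solution (csv_string : String) (keyword : String) : Int :=
  let csv_list := (PySem.Str.split? csv_string "\n").getD []   -- sep "\n" ≠ "": always `some`
  let team_list := PySem.List.slice csv_list (some 1) none
  let n := csv_list.length
  match buildA team_list (PySem.Dict.empty, List.replicate (n + 1) [], List.replicate (n + 1) (0 : Int)) with
  | none => 0   -- Python raises while parsing; outside Pre_solution
  | some st =>
    let names := st.1
    let graph := st.2.1
    let numbers := st.2.2
    let fin := names.keys.foldl (fun (acc : Int × List Bool) x =>
      let idv := names.getD x 0   -- names[x]: key always present (x ∈ keys)
      if PySem.Str.isIn keyword x && !(PySem.List.pyGetD acc.2 idv false) then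
        let check' := PySem.List.pySetD acc.2 idv true
        let out := bfsA graph numbers [idv] check' acc.1
        (out.2, out.1)
      else acc) ((0 : Int), List.replicate (n + 1) false)
    if fin.1 ≠ 0 then fin.1 else -1

-- ===== PORT B =====

/-- `[(int(i), name, p, int(num)) for i, name, p, num in rows]`; `none` where Python raises. -/
def parseFieldsB : List (List String) → Option (List (Int × String × String × Int))
  | [] => some []
  | r :: rs =>
    match r with
    | [a, b, c, d] =>
      match PySem.Int.ofStr? a, PySem.Int.ofStr? d with
      | some i, some m => (parseFieldsB rs).map (fun fs => (i, b, c, m) :: fs)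
      | _, _ => none
    | _ => none

/-- `[(int(p), i) for i, _, p, _ in fields if i != 1]`; `none` where `int(p)` raises. -/
def parseEdgesB : List (Int × String × String × Int) → Option (List (Int × Int))
  | [] => some []
  | f :: fs =>
    if f.1 = 1 then parseEdgesB fs
    else
      match PySem.Int.ofStr? f.2.2.1 with
      | some p => (parseEdgesB fs).map (fun es => (p, f.1) :: es)
      | none => none

/-- Body of `for p, c in edges: if p in marked and c not in marked: marked.add(c); changed = True`. -/
def passStepB (st : PySem.Set Int × Bool) (e : Int × Int) : PySem.Set Int × Bool :=
  if PySem.Set.contains st.1 e.1 && !PySem.Set.contains st.1 e.2 then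
    (PySem.Set.add st.1 e.2, true)
  else st

def solution_alt (csv_string : String) (keyword : String) : Int :=
  let lines := (PySem.Str.split? csv_string "\n").getD []   -- sep "\n" ≠ "": always `some`
  let rows := (PySem.List.slice lines (some 1) none).map (fun l => (PySem.Str.split? l ",").getD [])
  let n := lines.length
  match parseFieldsB rows with
  | none => 0   -- Python raises while parsing; outside Pre_solution
  | some fields =>
    match parseEdgesB fields with
    | none => 0
    | some edges =>
      let numbers := fields.foldl (fun (d : PySem.Dict Int Int) f => d.insert f.1 f.2.2.2)
        PySem.Dict.empty
      let marked0 := fields.foldl (fun (s : PySem.Set Int) f =>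
        if PySem.Str.isIn keyword f.2.1 then PySem.Set.add s f.1 else s) PySem.Set.empty
      let marked := ((PySem.List.pyRange 0 (n : Int) 1).foldl (fun (st : PySem.Set Int × Bool) _ =>
          if st.2 then st   -- already broken out of the loop
          else
            let p := edges.foldl passStepB (st.1, false)
            if p.2 then (p.1, false) else (p.1, true)) (marked0, false)).1
      -- sum over the marked set (`numbers[i]`: key always present under Pre_solution)
      let total := (marked.map (fun i => numbers.getD i 0)).sum
      if total ≠ 0 then total else -1

-- ===== PRECONDITION & SPEC =====

/-- Shape of one data row: exactly 4 comma fields, `int(id)`/`int(num)` succeed, and —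
restricting to the problem's natural domain — `0 ≤ id ≤ n` and, when the parent id is
read (`id ≠ 1`), `int(parent)` succeeds with `0 ≤ parent ≤ n`. -/
def preRowOK (n : Nat) (r : List String) : Bool :=
  r.length == 4 &&
  (match PySem.Int.ofStr? (r.getD 0 "") with
   | none => false
   | some i =>
     decide (0 ≤ i) && decide (i ≤ (n : Int)) && (PySem.Int.ofStr? (r.getD 3 "")).isSome &&
     (i == 1 ||
       (match PySem.Int.ofStr? (r.getD 2 "") with
        | none => false
        | some p => decide (0 ≤ p) && decide (p ≤ (n : Int)))))

-- Pre_solution admits exactly the well-formed team tables: every data row parses (else A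
-- raises ValueError/IndexError), ids and parent ids lie in the natural range 0..n (a negative
-- id/parent makes A wrap around the arrays — an artefact of Python indexing, outside the
-- problem's domain), and team names are distinct (on duplicate names A's dict keeps only the
-- last id per name, a dict-key artefact both behaviours of which are defensible).
def Pre_solution (csv_string : String) (keyword : String) : Prop :=
  let lines := (PySem.Str.split? csv_string "\n").getD []
  let rows := (lines.drop 1).map (fun l => (PySem.Str.split? l ",").getD [])
  (rows.all (preRowOK lines.length)) = true ∧ (rows.map (fun r => r.getD 1 "")).Nodup

instance (csv_string : String) (keyword : String) : Decidable (Pre_solution csv_string keyword) := by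
  unfold Pre_solution; infer_instance

def pvWitness_solution : String × String := ("team\n1,alpha,0,5\n2,beta,1,7", "alp")

def Spec_solution (csv_string : String) (keyword : String) (out : Int) : Prop :=
  out = solution_alt csv_string keyword
instance (csv_string : String) (keyword : String) (out : Int) :
    Decidable (Spec_solution csv_string keyword out) := by unfold Spec_solution; infer_instance

-- ===== CLAIM (what is proved, stated in full; the proofs are below) =====
def Claim_equal_solution : Prop := ∀ (csv_string : String) (keyword : String),
  Dom_solution csv_string keyword → Pre_solution csv_string keyword →
    Spec_solution csv_string keyword (solution csv_string keyword)

-- ===== LEMMAS AND PROOFS =====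

-- ## Generic PySem index helpers

theorem pyGetD_nonneg_getD {α : Type} (xs : List α) (i : Int) (d : α) (h : 0 ≤ i) :
    PySem.List.pyGetD xs i d = xs.getD i.toNat d := by
  simp only [PySem.List.pyGetD, PySem.List.pyGet?, PySem.List.pyIdx?, h, if_true]
  by_cases hlt : i < (xs.length : Int)
  · have : i.toNat < xs.length := by omega
    simp [hlt, List.getD, List.getElem?_eq_getElem this]
  · have : xs.length ≤ i.toNat := by omega
    simp [hlt, List.getD, List.getElem?_eq_none_iff.mpr this]

theorem pySetD_nonneg_set {α : Type} (xs : List α) (i : Int) (v : α) (h : 0 ≤ i) :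
    PySem.List.pySetD xs i v = xs.set i.toNat v := by
  simp only [PySem.List.pySetD, PySem.List.pySet?, PySem.List.pyIdx?, h, if_true]
  by_cases hlt : i < (xs.length : Int)
  · simp [hlt]
  · have : xs.length ≤ i.toNat := by omega
    simp [hlt, List.set_eq_of_length_le this]

-- ## The `split?` wrappers never return `none` for a nonempty separator, and never `some []`

theorem split_comma_some (s : String) :
    PySem.Str.split? s "," = some ((PySem.Str.split? s ",").getD []) := by
  simp [PySem.Str.split?, PySem.Chars.split?]

theorem splitOn_go_ne_nil (sep : List Char) (fuel : Nat) (l cur : List Char)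
    (acc : List (List Char)) : PySem.Chars.splitOn.go sep fuel l cur acc ≠ [] := by
  induction fuel generalizing l cur acc with
  | zero => simp [PySem.Chars.splitOn.go]
  | succ fuel ih =>
    cases l with
    | nil => simp [PySem.Chars.splitOn.go]
    | cons c rest =>
      rw [PySem.Chars.splitOn.go]
      by_cases h : sep.isPrefixOf (c :: rest) = true
      · simp only [h, if_true]; exact ih _ _ _
      · simp only [h, if_false]; exact ih _ _ _

theorem split_ne_nil (s : String) : (PySem.Str.split? s "\n").getD [] ≠ [] := by
  simp only [PySem.Str.split?, PySem.Chars.split?, PySem.Chars.splitOn]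
  intro h
  simp only [List.isEmpty_iff, reduceCtorEq, if_false, Option.map_some, Option.getD_some,
    List.map_eq_nil_iff, show ("\n".toList) = ['\n'] from rfl] at h
  exact splitOn_go_ne_nil _ _ _ _ _ h

-- ## Parsed-row abstraction (proof-side names for what both ports read out of a row)

def pvLines (csv : String) : List String := (PySem.Str.split? csv "\n").getD []
def pvRows (csv : String) : List (List String) :=
  ((pvLines csv).drop 1).map (fun l => (PySem.Str.split? l ",").getD [])

def rid (r : List String) : Int := (PySem.Int.ofStr? (r.getD 0 "")).getD 0
def rname (r : List String) : String := r.getD 1 ""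
def rnum (r : List String) : Int := (PySem.Int.ofStr? (r.getD 3 "")).getD 0
def rpar (r : List String) : Int := (PySem.Int.ofStr? (r.getD 2 "")).getD 0

/-- What `preRowOK` says, in usable form. -/
def RowOK (n : Nat) (r : List String) : Prop :=
  r.length = 4 ∧ PySem.Int.ofStr? (r.getD 0 "") = some (rid r) ∧ 0 ≤ rid r ∧ rid r ≤ (n : Int) ∧
    PySem.Int.ofStr? (r.getD 3 "") = some (rnum r) ∧
    (rid r ≠ 1 → PySem.Int.ofStr? (r.getD 2 "") = some (rpar r) ∧ 0 ≤ rpar r ∧ rpar r ≤ (n : Int))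

theorem preRowOK_iff (n : Nat) (r : List String) : preRowOK n r = true ↔ RowOK n r := by
  unfold preRowOK RowOK rid rnum rpar
  cases hi : PySem.Int.ofStr? (r.getD 0 "") <;>
    cases hp : PySem.Int.ofStr? (r.getD 2 "") <;>
      cases hd : PySem.Int.ofStr? (r.getD 3 "") <;> simp_all <;> tauto

-- ## Derived data of a parsed table

/-- Last-write-wins contents of the id → number store, shared shape of A's array fills and
B's dict comprehension. -/
def lastW : List (List String) → Int → Int → Int
  | [], _, d => d
  | r :: t, v, d => lastW t v (if v = rid r then rnum r else d)

def kidsOf (rows : List (List String)) (v : Int) : List Int :=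
  (rows.filter (fun r => !(rid r == 1) && (rpar r == v))).map rid

def edgesOf (rows : List (List String)) : List (Int × Int) :=
  (rows.filter (fun r => !(rid r == 1))).map (fun r => (rpar r, rid r))

def matchIds (keyword : String) (rows : List (List String)) : List Int :=
  (rows.filter (fun r => PySem.Str.isIn keyword (rname r))).map rid

def rowOf (x : String) : List String := (PySem.Str.split? x ",").getD []

/-- union of keyword-matching subtrees, as reachability from the matching ids. -/
def ReachR (edges : List (Int × Int)) (S : List Int) (v : Int) : Prop :=
  ∃ s ∈ S, Relation.ReflTransGen (fun p c => (p, c) ∈ edges) s v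

theorem mem_kidsOf_iff (rows : List (List String)) (v c : Int) :
    c ∈ kidsOf rows v ↔ (v, c) ∈ edgesOf rows := by
  simp only [kidsOf, edgesOf, List.mem_map, List.mem_filter, Bool.and_eq_true, Bool.not_eq_eq_eq_not,
    Bool.not_true, beq_eq_false_iff_ne, ne_eq, beq_iff_eq, Prod.mk.injEq]
  constructor
  · rintro ⟨r, ⟨⟨hr, h1, hp⟩, rfl⟩⟩; exact ⟨r, ⟨hr, h1⟩, hp, rfl⟩
  · rintro ⟨r, ⟨hr, h1⟩, hp, rfl⟩; exact ⟨r, ⟨hr, h1, hp⟩, rfl⟩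

-- ## A's building loop, characterised (under RowOK rows, from well-sized state)

theorem list_len4 {α : Type} (l : List α) (h : l.length = 4) : ∃ a b c d, l = [a, b, c, d] := by
  match l, h with
  | [a, b, c, d], _ => exact ⟨a, b, c, d, rfl⟩

theorem buildA_char (n : Nat) (team : List String)
    (hok : ∀ x ∈ team, RowOK n (rowOf x))
    (d : PySem.Dict String Int) (g : List (List Int)) (nu : List Int)
    (hg : g.length = n + 1) (hnu : nu.length = n + 1) :
    ∃ g' nu',
      buildA team (d, g, nu) =
        some (team.foldl (fun d x => d.insert (rname (rowOf x)) (rid (rowOf x))) d, g', nu') ∧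
      g'.length = n + 1 ∧ nu'.length = n + 1 ∧
      (∀ j : Nat, nu'.getD j 0 = lastW (team.map rowOf) (j : Int) (nu.getD j 0)) ∧
      (∀ j : Nat, g'.getD j [] = g.getD j [] ++ kidsOf (team.map rowOf) (j : Int)) := by
  induction team generalizing d g nu with
  | nil => exact ⟨g, nu, rfl, hg, hnu, fun j => rfl, fun j => by simp [kidsOf]⟩
  | cons x xs ih =>
    obtain ⟨h4, hid, hid0, hidn, hnum, hpar⟩ := hok x (by simp)
    obtain ⟨a, b, c, dd, hr4⟩ := list_len4 (rowOf x) h4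
    rw [hr4] at hid hid0 hidn hnum hpar
    have hida : PySem.Int.ofStr? a = some (rid [a, b, c, dd]) := by simpa using hid
    have hnumd : PySem.Int.ofStr? dd = some (rnum [a, b, c, dd]) := by simpa using hnum
    have hsplit : PySem.Str.split? x "," = some [a, b, c, dd] := by
      rw [split_comma_some x]; exact congrArg some hr4
    have hset : PySem.List.pySet? nu (rid [a, b, c, dd]) (rnum [a, b, c, dd]) =
        some (nu.set (rid [a, b, c, dd]).toNat (rnum [a, b, c, dd])) := by
      simp only [PySem.List.pySet?, PySem.List.pyIdx?, hid0, if_true, hnu]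
      have hlt : rid [a, b, c, dd] < (((n + 1 : Nat)) : Int) := by push_cast; omega
      rw [if_pos hlt]; rfl
    have hnusetlen : (nu.set (rid [a, b, c, dd]).toNat (rnum [a, b, c, dd])).length = n + 1 := by
      simp [hnu]
    have hnuset : ∀ j : Nat, (nu.set (rid [a, b, c, dd]).toNat (rnum [a, b, c, dd])).getD j 0 =
        if (j : Int) = rid [a, b, c, dd] then rnum [a, b, c, dd] else nu.getD j 0 := by
      intro j
      have htn : ((j : Int) = rid [a, b, c, dd]) ↔ j = (rid [a, b, c, dd]).toNat := by omega
      simp only [List.getD, List.getElem?_set]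
      have hnn : ¬ rid [a, b, c, dd] < 0 := by omega
      by_cases hj : j = (rid [a, b, c, dd]).toNat
      · have hlt : (rid [a, b, c, dd]).toNat < nu.length := by omega
        simp [hj, hlt, htn, hnn]
      · simp [Ne.symm hj, htn, hj, hnn]
    by_cases hone : rid [a, b, c, dd] = 1
    · -- `continue` branch
      have hstep : buildRowA (d, g, nu) x =
          some (d.insert (rname [a, b, c, dd]) (rid [a, b, c, dd]), g,
            nu.set (rid [a, b, c, dd]).toNat (rnum [a, b, c, dd])) := by
        simp only [buildRowA, hsplit, hida, hnumd, hset]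
        rw [if_pos hone]
        rfl
      obtain ⟨g', nu', hbuild, hg', hnu', hnuchar, hgchar⟩ :=
        ih (fun y hy => hok y (by simp [hy])) (d.insert (rname [a, b, c, dd]) (rid [a, b, c, dd]))
          g (nu.set (rid [a, b, c, dd]).toNat (rnum [a, b, c, dd])) hg hnusetlen
      refine ⟨g', nu', ?_, hg', hnu', ?_, ?_⟩
      · rw [show buildA (x :: xs) (d, g, nu) = buildA xs
          (d.insert (rname [a, b, c, dd]) (rid [a, b, c, dd]), g,
            nu.set (rid [a, b, c, dd]).toNat (rnum [a, b, c, dd])) by simp [buildA, hstep]]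
        rw [hbuild, List.foldl_cons, hr4]
      · intro j
        rw [List.map_cons, hr4]
        simp only [lastW]
        rw [hnuchar j, hnuset j]
      · intro j
        rw [hgchar j, List.map_cons, hr4]
        have : kidsOf ([a, b, c, dd] :: List.map rowOf xs) (j : Int)
            = kidsOf (List.map rowOf xs) (j : Int) := by
          simp [kidsOf, List.filter_cons, hone]
        rw [this]
    · -- parent edge branch
      obtain ⟨hpeq, hp0, hpn⟩ := hpar hone
      have hpeqc : PySem.Int.ofStr? c = some (rpar [a, b, c, dd]) := by simpa using hpeq
      have hplt : (rpar [a, b, c, dd]).toNat < g.length := by omega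
      have hgget : PySem.List.pyGet? g (rpar [a, b, c, dd]) = some (g[(rpar [a, b, c, dd]).toNat]) := by
        simp only [PySem.List.pyGet?, PySem.List.pyIdx?, hp0, if_true, hg]
        have hlt : rpar [a, b, c, dd] < (((n + 1 : Nat)) : Int) := by push_cast; omega
        rw [if_pos hlt]
        simp [List.getElem?_eq_getElem hplt]
      have hgset : PySem.List.pySet? g (rpar [a, b, c, dd])
            (g[(rpar [a, b, c, dd]).toNat] ++ [rid [a, b, c, dd]]) =
          some (g.set (rpar [a, b, c, dd]).toNat
            (g[(rpar [a, b, c, dd]).toNat] ++ [rid [a, b, c, dd]])) := by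
        simp only [PySem.List.pySet?, PySem.List.pyIdx?, hp0, if_true, hg]
        have hlt : rpar [a, b, c, dd] < (((n + 1 : Nat)) : Int) := by push_cast; omega
        rw [if_pos hlt]; rfl
      have hstep : buildRowA (d, g, nu) x =
          some (d.insert (rname [a, b, c, dd]) (rid [a, b, c, dd]),
            g.set (rpar [a, b, c, dd]).toNat (g[(rpar [a, b, c, dd]).toNat] ++ [rid [a, b, c, dd]]),
            nu.set (rid [a, b, c, dd]).toNat (rnum [a, b, c, dd])) := by
        simp only [buildRowA, hsplit, hida, hnumd, hset]
        rw [if_neg hone]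
        simp only [hpeqc, hgget, hgset]
        rfl
      have hg1len : (g.set (rpar [a, b, c, dd]).toNat
          (g[(rpar [a, b, c, dd]).toNat] ++ [rid [a, b, c, dd]])).length = n + 1 := by simp [hg]
      have hg1get : ∀ j : Nat, (g.set (rpar [a, b, c, dd]).toNat
            (g[(rpar [a, b, c, dd]).toNat] ++ [rid [a, b, c, dd]])).getD j [] =
          if (j : Int) = rpar [a, b, c, dd] then g.getD j [] ++ [rid [a, b, c, dd]]
          else g.getD j [] := by
        intro j
        have htn : ((j : Int) = rpar [a, b, c, dd]) ↔ j = (rpar [a, b, c, dd]).toNat := by omega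
        have hnn : ¬ rpar [a, b, c, dd] < 0 := by omega
        simp only [List.getD, List.getElem?_set]
        by_cases hj : j = (rpar [a, b, c, dd]).toNat
        · simp [hj, hplt, htn, List.getElem?_eq_getElem hplt, hnn]
        · simp [Ne.symm hj, htn, hj, hnn]
      obtain ⟨g', nu', hbuild, hg', hnu', hnuchar, hgchar⟩ :=
        ih (fun y hy => hok y (by simp [hy])) (d.insert (rname [a, b, c, dd]) (rid [a, b, c, dd]))
          (g.set (rpar [a, b, c, dd]).toNat (g[(rpar [a, b, c, dd]).toNat] ++ [rid [a, b, c, dd]]))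
          (nu.set (rid [a, b, c, dd]).toNat (rnum [a, b, c, dd])) hg1len hnusetlen
      refine ⟨g', nu', ?_, hg', hnu', ?_, ?_⟩
      · rw [show buildA (x :: xs) (d, g, nu) = buildA xs
          (d.insert (rname [a, b, c, dd]) (rid [a, b, c, dd]),
            g.set (rpar [a, b, c, dd]).toNat (g[(rpar [a, b, c, dd]).toNat] ++ [rid [a, b, c, dd]]),
            nu.set (rid [a, b, c, dd]).toNat (rnum [a, b, c, dd])) by simp [buildA, hstep]]
        rw [hbuild, List.foldl_cons, hr4]
      · intro j
        rw [List.map_cons, hr4]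
        simp only [lastW]
        rw [hnuchar j, hnuset j]
      · intro j
        rw [hgchar j, hg1get j, List.map_cons, hr4]
        have hkids : kidsOf ([a, b, c, dd] :: List.map rowOf xs) (j : Int) =
            (if (j : Int) = rpar [a, b, c, dd] then [rid [a, b, c, dd]] else []) ++
              kidsOf (List.map rowOf xs) (j : Int) := by
          simp only [kidsOf, List.filter_cons]
          by_cases hj : (j : Int) = rpar [a, b, c, dd]
          · have : (!(rid [a, b, c, dd] == 1) && (rpar [a, b, c, dd] == (j : Int))) = true := by
              simp [hone, hj]
            simp [this, hj, hone]
          · have : (!(rid [a, b, c, dd] == 1) && (rpar [a, b, c, dd] == (j : Int))) = false := by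
              simp; intro _; omega
            simp [this, hj, hone]
        rw [hkids]
        by_cases hj : (j : Int) = rpar [a, b, c, dd] <;> simp [hj, List.append_assoc]

-- ## B's parsing, characterised

def fieldOf (r : List String) : Int × String × String × Int := (rid r, rname r, r.getD 2 "", rnum r)

theorem parseFieldsB_char (n : Nat) (rows : List (List String)) (hok : ∀ r ∈ rows, RowOK n r) :
    parseFieldsB rows = some (rows.map fieldOf) := by
  induction rows with
  | nil => rfl
  | cons r rs ih =>
    obtain ⟨h4, hid, -, -, hnum, -⟩ := hok r (by simp)
    obtain ⟨a, b, c, dd, rfl⟩ := list_len4 r h4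
    have hida : PySem.Int.ofStr? a = some (rid [a, b, c, dd]) := by simpa using hid
    have hnumd : PySem.Int.ofStr? dd = some (rnum [a, b, c, dd]) := by simpa using hnum
    simp only [parseFieldsB, hida, hnumd, ih (fun r hr => hok r (by simp [hr])), Option.map_some,
      List.map_cons]
    rfl

theorem parseEdgesB_char (n : Nat) (rows : List (List String)) (hok : ∀ r ∈ rows, RowOK n r) :
    parseEdgesB (rows.map fieldOf) = some (edgesOf rows) := by
  induction rows with
  | nil => rfl
  | cons r rs ih =>
    have ih' := ih (fun r hr => hok r (by simp [hr]))
    by_cases hone : rid r = 1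
    · simp [parseEdgesB, fieldOf, hone, ih', edgesOf, List.filter_cons]
    · obtain ⟨hpeq, -, -⟩ := (hok r (by simp)).2.2.2.2.2 hone
      have hpeq' : PySem.Int.ofStr? (r[2]?.getD "") = some (rpar r) := hpeq
      simp [parseEdgesB, fieldOf, hone, hpeq', edgesOf, List.filter_cons]
      exact ih'

theorem numbersB_getD (rows : List (List String)) (d : PySem.Dict Int Int) (v : Int) :
    ((rows.map fieldOf).foldl (fun (d : PySem.Dict Int Int) f => d.insert f.1 f.2.2.2) d).getD v 0
      = lastW rows v (d.getD v 0) := by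
  induction rows generalizing d with
  | nil => rfl
  | cons r rs ih =>
    simp only [List.map_cons, List.foldl_cons, lastW, fieldOf]
    rw [ih]
    congr 1
    rw [PySem.Dict.getD_insert]

theorem matchIds_cons (keyword : String) (r : List String) (rs : List (List String)) :
    matchIds keyword (r :: rs) =
      if PySem.Str.isIn keyword (rname r) then rid r :: matchIds keyword rs
      else matchIds keyword rs := by
  simp only [matchIds, List.filter_cons]
  by_cases hm : PySem.Str.isIn keyword (rname r) = true
  · simp only [hm, if_true]; simp
  · rw [Bool.not_eq_true] at hm; simp only [hm]; simp

theorem marked0_mem (keyword : String) (rows : List (List String)) (s0 : PySem.Set Int) (v : Int) :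
    v ∈ (rows.map fieldOf).foldl (fun (s : PySem.Set Int) f =>
        if PySem.Str.isIn keyword f.2.1 then PySem.Set.add s f.1 else s) s0
      ↔ v ∈ s0 ∨ v ∈ matchIds keyword rows := by
  induction rows generalizing s0 with
  | nil => simp [matchIds]
  | cons r rs ih =>
    simp only [List.map_cons, List.foldl_cons, fieldOf]
    rw [matchIds_cons]
    by_cases hm : PySem.Str.isIn keyword (rname r) = true
    · rw [if_pos hm, if_pos hm, ih]
      simp only [PySem.Set.mem_add, List.mem_cons]
      tauto
    · rw [if_neg hm, if_neg hm, ih]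

theorem marked0_nodup (keyword : String) (rows : List (List String)) (s0 : PySem.Set Int)
    (h : s0.Nodup) :
    ((rows.map fieldOf).foldl (fun (s : PySem.Set Int) f =>
        if PySem.Str.isIn keyword f.2.1 then PySem.Set.add s f.1 else s) s0).Nodup := by
  induction rows generalizing s0 with
  | nil => exact h
  | cons r rs ih =>
    simp only [List.map_cons, List.foldl_cons, fieldOf]
    by_cases hm : PySem.Str.isIn keyword (rname r) = true
    · rw [if_pos hm]; exact ih _ (PySem.Set.nodup_add _ _ h)
    · rw [if_neg hm]; exact ih _ h

-- ## A's names dict, characterised (distinct names)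

theorem namesA_getD_of_not_mem (rows : List (List String)) (d : PySem.Dict String Int) (k : String)
    (h : ∀ r ∈ rows, rname r ≠ k) :
    (rows.foldl (fun (d : PySem.Dict String Int) r => d.insert (rname r) (rid r)) d).getD k 0
      = d.getD k 0 := by
  induction rows generalizing d with
  | nil => rfl
  | cons r rs ih =>
    simp only [List.foldl_cons]
    rw [ih _ (fun r hr => h r (by simp [hr])), PySem.Dict.getD_insert,
      if_neg (fun he => h r (by simp) he.symm)]

theorem namesA_getD (rows : List (List String)) (d : PySem.Dict String Int) (r0 : List String)
    (hr0 : r0 ∈ rows) (hnd : (rows.map rname).Nodup) :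
    (rows.foldl (fun (d : PySem.Dict String Int) r => d.insert (rname r) (rid r)) d).getD (rname r0) 0
      = rid r0 := by
  induction rows generalizing d with
  | nil => simp at hr0
  | cons r rs ih =>
    rw [List.map_cons, List.nodup_cons] at hnd
    simp only [List.foldl_cons]
    rcases List.mem_cons.mp hr0 with heq | hr0'
    · rw [namesA_getD_of_not_mem rs _ (rname r0) ?_, PySem.Dict.getD_insert,
        if_pos (by rw [heq]), heq]
      intro rr hrr he
      apply hnd.1
      rw [← heq, ← he]
      exact List.mem_map_of_mem hrr
    · exact ih (d.insert (rname r) (rid r)) hr0' hnd.2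

theorem namesA_keys (rows : List (List String)) (hnd : (rows.map rname).Nodup) :
    (rows.foldl (fun (d : PySem.Dict String Int) r => d.insert (rname r) (rid r))
      PySem.Dict.empty).keys = rows.map rname := by
  rw [PySem.Dict.keys_foldl_insert_key rows (fun r => rname r)
    (fun d r => rid r) PySem.Dict.empty]
  have : (PySem.Dict.empty : PySem.Dict String Int).keys = ([] : List String) := rfl
  rw [this]
  have : PySem.Set.update ([] : List String) (rows.map rname) = PySem.Set.ofList (rows.map rname) := rfl
  rw [this, PySem.Set.ofList_eq_self_of_nodup _ hnd]

-- ## B's propagation loop, characterised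

theorem not_mem_of_contains_false {α : Type} [BEq α] [LawfulBEq α] (s : PySem.Set α) (x : α)
    (h : PySem.Set.contains s x = false) : x ∉ s := by
  intro hm
  rw [(PySem.Set.contains_iff s x).mpr hm] at h
  cases h

def Closed (edges : List (Int × Int)) (m : List Int) : Prop :=
  ∀ e ∈ edges, e.1 ∈ m → e.2 ∈ m

def outStep (edges : List (Int × Int)) (st : PySem.Set Int × Bool) : PySem.Set Int × Bool :=
  if st.2 then st
  else
    let p := edges.foldl passStepB (st.1, false)
    if p.2 then (p.1, false) else (p.1, true)

theorem pass_prefix (edges : List (Int × Int)) (m : PySem.Set Int) (ch : Bool) :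
    ∃ ext, (edges.foldl passStepB (m, ch)).1 = m ++ ext := by
  induction edges generalizing m ch with
  | nil => exact ⟨[], by simp⟩
  | cons e es ih =>
    simp only [List.foldl_cons, passStepB]
    by_cases hc : (PySem.Set.contains m e.1 && !PySem.Set.contains m e.2) = true
    · rw [if_pos hc]
      obtain ⟨ext, hext⟩ := ih (PySem.Set.add m e.2) true
      refine ⟨e.2 :: ext, ?_⟩
      rw [hext, show PySem.Set.add m e.2 = m ++ [e.2] from ?_, List.append_assoc]
      · rfl
      · simp only [Bool.and_eq_true, Bool.not_eq_true'] at hc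
        simp [PySem.Set.add, hc.2, not_mem_of_contains_false m e.2 hc.2]
    · rw [if_neg hc]; exact ih m ch

theorem pass_nodup (edges : List (Int × Int)) (m : PySem.Set Int) (ch : Bool) (h : m.Nodup) :
    (edges.foldl passStepB (m, ch)).1.Nodup := by
  induction edges generalizing m ch with
  | nil => exact h
  | cons e es ih =>
    simp only [List.foldl_cons, passStepB]
    by_cases hc : (PySem.Set.contains m e.1 && !PySem.Set.contains m e.2) = true
    · rw [if_pos hc]; exact ih _ _ (PySem.Set.nodup_add _ _ h)
    · rw [if_neg hc]; exact ih _ _ h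

theorem pass_flag_mono (edges : List (Int × Int)) (m : PySem.Set Int) :
    (edges.foldl passStepB (m, true)).2 = true := by
  induction edges generalizing m with
  | nil => rfl
  | cons e es ih =>
    simp only [List.foldl_cons, passStepB]
    by_cases hc : (PySem.Set.contains m e.1 && !PySem.Set.contains m e.2) = true
    · rw [if_pos hc]; exact ih _
    · rw [if_neg hc]; exact ih _

theorem pass_false_fix (edges : List (Int × Int)) (m : PySem.Set Int)
    (h : (edges.foldl passStepB (m, false)).2 = false) :
    (edges.foldl passStepB (m, false)).1 = m ∧ Closed edges m := by
  induction edges generalizing m with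
  | nil => exact ⟨rfl, fun e he => by simp at he⟩
  | cons e es ih =>
    simp only [List.foldl_cons, passStepB] at h ⊢
    by_cases hc : (PySem.Set.contains m e.1 && !PySem.Set.contains m e.2) = true
    · rw [if_pos hc] at h
      rw [pass_flag_mono es _] at h
      exact absurd h (by simp)
    · rw [if_neg hc] at h ⊢
      obtain ⟨h1, h2⟩ := ih m h
      refine ⟨h1, fun e' he' hm => ?_⟩
      rcases List.mem_cons.mp he' with rfl | he'
      · simp only [Bool.and_eq_true, Bool.not_eq_true', not_and] at hc
        have hc2 := hc ((PySem.Set.contains_iff _ _).mpr hm)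
        refine (PySem.Set.contains_iff _ _).mp ?_
        revert hc2
        cases hcon : PySem.Set.contains m e'.2 <;> simp
      · exact h2 e' he' hm

theorem pass_grow (edges : List (Int × Int)) (m : PySem.Set Int)
    (h : (edges.foldl passStepB (m, false)).2 = true) :
    m.length < (edges.foldl passStepB (m, false)).1.length := by
  induction edges generalizing m with
  | nil => simp at h
  | cons e es ih =>
    simp only [List.foldl_cons, passStepB] at h ⊢
    by_cases hc : (PySem.Set.contains m e.1 && !PySem.Set.contains m e.2) = true
    · rw [if_pos hc] at h ⊢
      obtain ⟨ext, hext⟩ := pass_prefix es (PySem.Set.add m e.2) true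
      rw [hext]
      simp only [Bool.and_eq_true, Bool.not_eq_true'] at hc
      rw [show PySem.Set.add m e.2 = m ++ [e.2] by simp [PySem.Set.add, hc.2,
        not_mem_of_contains_false m e.2 hc.2]]
      simp
    · rw [if_neg hc] at h ⊢; exact ih m h

theorem pass_upper (edges : List (Int × Int)) (C : Int → Prop)
    (hC : ∀ e ∈ edges, C e.1 → C e.2) (m : PySem.Set Int) (ch : Bool)
    (hm : ∀ v ∈ m, C v) : ∀ v ∈ (edges.foldl passStepB (m, ch)).1, C v := by
  induction edges generalizing m ch with
  | nil => exact hm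
  | cons e es ih =>
    simp only [List.foldl_cons, passStepB]
    by_cases hc : (PySem.Set.contains m e.1 && !PySem.Set.contains m e.2) = true
    · rw [if_pos hc]
      refine ih (fun e' he' => hC e' (by simp [he'])) _ _ ?_
      intro v hv
      rcases (PySem.Set.mem_add m e.2 v).mp hv with hv | rfl
      · exact hm v hv
      · simp only [Bool.and_eq_true, Bool.not_eq_true'] at hc
        exact hC e (by simp) (hm _ ((PySem.Set.contains_iff _ _).mp hc.1))
    · rw [if_neg hc]; exact ih (fun e' he' => hC e' (by simp [he'])) _ _ hm

theorem outerB_char (edges : List (Int × Int)) (C : Int → Prop)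
    (hC : ∀ e ∈ edges, C e.1 → C e.2) (L : List Int) (st : PySem.Set Int × Bool)
    (h1 : st.1.Nodup) (h2 : ∀ v ∈ st.1, C v) (h3 : st.2 = true → Closed edges st.1) :
    (L.foldl (fun st (_ : Int) => outStep edges st) st).1.Nodup ∧
    (∀ v ∈ st.1, v ∈ (L.foldl (fun st (_ : Int) => outStep edges st) st).1) ∧
    (∀ v ∈ (L.foldl (fun st (_ : Int) => outStep edges st) st).1, C v) ∧
    ((L.foldl (fun st (_ : Int) => outStep edges st) st).2 = true →
      Closed edges (L.foldl (fun st (_ : Int) => outStep edges st) st).1) ∧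
    ((L.foldl (fun st (_ : Int) => outStep edges st) st).2 = true ∨
      st.1.length + L.length ≤ (L.foldl (fun st (_ : Int) => outStep edges st) st).1.length) := by
  induction L generalizing st with
  | nil => exact ⟨h1, fun v hv => hv, h2, h3, Or.inr (by simp)⟩
  | cons x xs ih =>
    simp only [List.foldl_cons]
    obtain ⟨st1, st2⟩ := st
    by_cases hflag : st2 = true
    · subst hflag
      have hstep : outStep edges (st1, true) = (st1, true) := by simp [outStep]
      rw [hstep]
      obtain ⟨i1, i2, i3, i4, i5⟩ := ih (st1, true) h1 h2 h3
      exact ⟨i1, i2, i3, i4, Or.inl (by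
        rcases i5 with i5 | _
        · exact i5
        · -- flag stays true through the fold
          have : ∀ (L : List Int) (m : PySem.Set Int),
              (L.foldl (fun st (_ : Int) => outStep edges st) (m, true)).2 = true := by
            intro L
            induction L with
            | nil => intro m; rfl
            | cons y ys ihy => intro m; simp only [List.foldl_cons, outStep]; exact ihy m
          exact this xs st1)⟩
    · rw [Bool.not_eq_true] at hflag; subst hflag
      have hstep : outStep edges (st1, false) =
          (if (edges.foldl passStepB (st1, false)).2 then
            ((edges.foldl passStepB (st1, false)).1, false)
          else ((edges.foldl passStepB (st1, false)).1, true)) := by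
        simp [outStep]
      by_cases hp : (edges.foldl passStepB (st1, false)).2 = true
      · rw [hstep, if_pos hp]
        have hlen := pass_grow edges st1 hp
        obtain ⟨i1, i2, i3, i4, i5⟩ := ih ((edges.foldl passStepB (st1, false)).1, false)
          (pass_nodup edges st1 false h1) (pass_upper edges C hC st1 false h2) (by simp)
        obtain ⟨ext, hext⟩ := pass_prefix edges st1 false
        refine ⟨i1, fun v hv => i2 v (by rw [hext]; exact List.mem_append_left _ hv), i3, i4, ?_⟩
        rcases i5 with i5 | i5
        · exact Or.inl i5
        · exact Or.inr (by simp only [List.length_cons] at *; omega)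
      · rw [Bool.not_eq_true] at hp
        rw [hstep, if_neg (by rw [hp]; simp)]
        obtain ⟨hfix, hclosed⟩ := pass_false_fix edges st1 hp
        rw [hfix]
        obtain ⟨i1, i2, i3, i4, i5⟩ := ih (st1, true) h1 h2 (fun _ => hclosed)
        refine ⟨i1, i2, i3, i4, Or.inl ?_⟩
        have : ∀ (L : List Int) (m : PySem.Set Int),
            (L.foldl (fun st (_ : Int) => outStep edges st) (m, true)).2 = true := by
          intro L
          induction L with
          | nil => intro m; rfl
          | cons y ys ihy => intro m; simp only [List.foldl_cons, outStep]; exact ihy m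
        exact this xs st1

theorem reach_sub_closed (edges : List (Int × Int)) (S : List Int) (m : List Int)
    (hS : ∀ s ∈ S, s ∈ m) (hc : Closed edges m) (v : Int) (hv : ReachR edges S v) : v ∈ m := by
  obtain ⟨s, hs, hrtg⟩ := hv
  induction hrtg with
  | refl => exact hS s hs
  | tail _ hbc ih => exact hc _ hbc ih

-- ## A's BFS, characterised

/-- `res` credit of a check array: sum of weights of the marked positions. -/
def TS (w : Nat → Int) (check : List Bool) : Int :=
  ((List.range check.length).map (fun j => if check.getD j false then w j else 0)).sum

theorem getD_set_true (check : List Bool) (j k : Nat) (hj : j < check.length) :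
    (check.set j true).getD k false = if k = j then true else check.getD k false := by
  simp only [List.getD, List.getElem?_set]
  by_cases hk : k = j
  · simp [hk, hj]
  · rw [if_neg (fun h : j = k => hk h.symm), if_neg hk]

theorem sum_map_update (len j : Nat) (hj : j < len) (w1 w2 : Nat → Int)
    (hsame : ∀ k, k ≠ j → w2 k = w1 k) :
    ((List.range len).map w2).sum = ((List.range len).map w1).sum + (w2 j - w1 j) := by
  induction len with
  | zero => omega
  | succ m ih =>
    rw [List.range_succ, List.map_append, List.map_append, List.sum_append, List.sum_append]
    by_cases hjm : j = m
    · subst hjm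
      have hmap : (List.range j).map w2 = (List.range j).map w1 :=
        List.map_congr_left (fun k hk => hsame k (by have := List.mem_range.mp hk; omega))
      rw [hmap]
      simp only [List.map_cons, List.map_nil, List.sum_cons, List.sum_nil]
      ring
    · have hjlt : j < m := by omega
      rw [ih hjlt]
      simp only [List.map_cons, List.map_nil, List.sum_cons, List.sum_nil, hsame m (by omega)]
      ring

theorem TS_set (w : Nat → Int) (check : List Bool) (j : Nat) (hj : j < check.length)
    (hf : check.getD j false = false) :
    TS w (check.set j true) = TS w check + w j := by
  unfold TS
  rw [List.length_set]
  have h := sum_map_update check.length j hj (fun k => if check.getD k false then w k else 0)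
      (fun k => if (check.set j true).getD k false then w k else 0)
      (fun k hk => by beta_reduce; rw [getD_set_true check j k hj]; simp [hk])
  beta_reduce at h
  rw [h, getD_set_true check j j hj]
  simp only [List.getD] at hf
  simp [hf]

/-- Effect of one `for nxt in graph[now]` scan: the freshly marked kids are appended to the
queue, everything else is bookkeeping. -/
theorem bfsStepA_fold_char (w : Nat → Int) (idl : List Int)
    (hidl : ∀ v ∈ idl, 0 ≤ v)
    (kids : List Int) (hk : ∀ c ∈ kids, c ∈ idl) :
    ∀ (check : List Bool) (qa : List Int),
    (∀ v ∈ idl, v.toNat < check.length) →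
    ∃ new : List Int,
      (kids.foldl bfsStepA (check, qa)).2 = qa ++ new ∧
      (kids.foldl bfsStepA (check, qa)).1.length = check.length ∧
      (∀ j, (kids.foldl bfsStepA (check, qa)).1.getD j false = true ↔
        check.getD j false = true ∨ j ∈ new.map Int.toNat) ∧
      (∀ c ∈ new, c ∈ kids ∧ check.getD c.toNat false = false) ∧
      (new.map Int.toNat).Nodup ∧
      (∀ c ∈ kids, (kids.foldl bfsStepA (check, qa)).1.getD c.toNat false = true) ∧
      TS w (kids.foldl bfsStepA (check, qa)).1 = TS w check + (new.map (fun c => w c.toNat)).sum := by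
  induction kids with
  | nil =>
    intro check qa _
    exact ⟨[], by simp, rfl, by simp, by simp, by simp, by simp, by simp⟩
  | cons k ks ih =>
    intro check qa hlen
    have hkidl : k ∈ idl := hk k (by simp)
    have hk0 : 0 ≤ k := hidl k hkidl
    have hklen : k.toNat < check.length := hlen k hkidl
    have hread : PySem.List.pyGetD check k true = check.getD k.toNat false := by
      rw [pyGetD_nonneg_getD check k true hk0]
      simp only [List.getD]
      cases hg : check[k.toNat]? with
      | none => exact absurd (List.getElem?_eq_none_iff.mp hg) (by omega)
      | some b => rfl
    by_cases hmk : check.getD k.toNat false = false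
    · -- fresh kid: mark it and append it
      have hstep : bfsStepA (check, qa) k = (check.set k.toNat true, qa ++ [k]) := by
        simp only [bfsStepA, hread, hmk, if_true]
        rw [pySetD_nonneg_set check k true hk0]
      rw [List.foldl_cons, hstep]
      obtain ⟨new, n1, n2, n3, n4, n5, n6, n7⟩ :=
        ih (fun c hc => hk c (by simp [hc])) (check.set k.toNat true) (qa ++ [k])
          (fun v hv => by rw [List.length_set]; exact hlen v hv)
      refine ⟨k :: new, ?_, ?_, ?_, ?_, ?_, ?_, ?_⟩
      · rw [n1, List.append_assoc]; rfl
      · rw [n2, List.length_set]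
      · intro j
        rw [n3 j, getD_set_true check k.toNat j hklen]
        by_cases hj : j = k.toNat <;> simp [hj] <;> tauto
      · intro c hc
        rcases List.mem_cons.mp hc with rfl | hc
        · exact ⟨by simp, hmk⟩
        · refine ⟨by simp [(n4 c hc).1], ?_⟩
          have := (n4 c hc).2
          rw [getD_set_true check k.toNat c.toNat hklen] at this
          by_cases hcj : c.toNat = k.toNat
          · rw [hcj] at this; simp at this
          · rwa [if_neg hcj] at this
      · rw [List.map_cons, List.nodup_cons]
        refine ⟨fun hmem => ?_, n5⟩
        obtain ⟨c, hc, hceq⟩ := List.mem_map.mp hmem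
        have := (n4 c hc).2
        rw [getD_set_true check k.toNat c.toNat hklen, hceq, if_pos rfl] at this
        cases this
      · intro c hc
        rcases List.mem_cons.mp hc with heq | hc
        · rw [n3 c.toNat]
          exact Or.inl (by rw [heq, getD_set_true check k.toNat k.toNat hklen]; simp)
        · exact n6 c hc
      · rw [n7, TS_set w check k.toNat hklen hmk, List.map_cons, List.sum_cons]
        ring
    · -- kid already marked: no-op
      have hmk' : check.getD k.toNat false = true := by
        cases h : check.getD k.toNat false
        · exact absurd h hmk
        · rfl
      have hstep : bfsStepA (check, qa) k = (check, qa) := by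
        simp only [bfsStepA, hread, hmk']
        simp
      rw [List.foldl_cons, hstep]
      obtain ⟨new, n1, n2, n3, n4, n5, n6, n7⟩ :=
        ih (fun c hc => hk c (by simp [hc])) check qa hlen
      refine ⟨new, n1, n2, n3, fun c hc => ⟨by simp [(n4 c hc).1], (n4 c hc).2⟩, n5, ?_, n7⟩
      intro c hc
      rcases List.mem_cons.mp hc with heq | hc
      · rw [n3 c.toNat, heq]; exact Or.inl hmk'
      · exact n6 c hc

theorem bfsA_main (graph : List (List Int)) (numbers : List Int) (w : Nat → Int)
    (idl : List Int) (edges : List (Int × Int)) (P : Int → Prop) (N : Nat)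
    (hidl0 : ∀ v ∈ idl, 0 ≤ v) (hidlN : ∀ v ∈ idl, v.toNat < N)
    (hgraph : ∀ v ∈ idl, ∀ c : Int, c ∈ PySem.List.pyGetD graph v [] ↔ (v, c) ∈ edges)
    (hkidl : ∀ v c : Int, (v, c) ∈ edges → c ∈ idl)
    (hnum : ∀ v ∈ idl, PySem.List.pyGetD numbers v 0 = w v.toNat)
    (hP : ∀ p c : Int, P p → (p, c) ∈ edges → P c) :
    ∀ (q : List Int) (check : List Bool) (res : Int),
      check.length = N →
      (∀ x ∈ q, x ∈ idl ∧ P x) →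
      (q.map Int.toNat).Nodup →
      (∀ x ∈ q, check.getD x.toNat false = true) →
      (∀ v ∈ idl, check.getD v.toNat false = true → v.toNat ∉ q.map Int.toNat →
        ∀ c, (v, c) ∈ edges → check.getD c.toNat false = true) →
      (∀ j, check.getD j false = true → ∃ v ∈ idl, P v ∧ v.toNat = j) →
      ((bfsA graph numbers q check res).1.length = N ∧
       (∀ j, check.getD j false = true → (bfsA graph numbers q check res).1.getD j false = true) ∧
       (∀ j, (bfsA graph numbers q check res).1.getD j false = true → ∃ v ∈ idl, P v ∧ v.toNat = j) ∧
       (∀ v ∈ idl, (bfsA graph numbers q check res).1.getD v.toNat false = true →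
         ∀ c, (v, c) ∈ edges → (bfsA graph numbers q check res).1.getD c.toNat false = true) ∧
       (bfsA graph numbers q check res).2
         = res + (TS w (bfsA graph numbers q check res).1 - TS w check)
             + (q.map (fun x => w x.toNat)).sum) := by
  intro q check res
  induction q, check, res using bfsA.induct graph numbers with
  | case1 check res =>
    intro hlen hq hqnd hqm hcl hup
    simp only [bfsA]
    refine ⟨hlen, fun j h => h, hup, ?_, by simp⟩
    intro v hv hm c hec
    exact hcl v hv hm (by simp) c hec
  | case2 now rest check res res' st ih =>
    intro hlen hq hqnd hqm hcl hup
    have hst : st = List.foldl bfsStepA (check, rest) (PySem.List.pyGetD graph now []) := rfl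
    have hres' : res' = res + PySem.List.pyGetD numbers now 0 := rfl
    rw [hst, hres'] at ih
    obtain ⟨hnowidl, hnowP⟩ := hq now (by simp)
    obtain ⟨new, n1, n2, n3, n4, n5, n6, n7⟩ :=
      bfsStepA_fold_char w idl hidl0 (PySem.List.pyGetD graph now [])
        (fun c hc => hkidl now c ((hgraph now hnowidl c).mp hc)) check rest
        (fun v hv => by rw [hlen]; exact hidlN v hv)
    have hnewidl : ∀ c ∈ new, c ∈ idl := fun c hc =>
      hkidl now c ((hgraph now hnowidl c).mp (n4 c hc).1)
    have hnewP : ∀ c ∈ new, P c := fun c hc =>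
      hP now c hnowP ((hgraph now hnowidl c).mp (n4 c hc).1)
    have hrestnd : (rest.map Int.toNat).Nodup ∧ now.toNat ∉ rest.map Int.toNat := by
      have := hqnd
      rw [List.map_cons, List.nodup_cons] at this
      exact ⟨this.2, this.1⟩
    -- hypotheses for the recursive state
    have hq' : ∀ x ∈ rest ++ new, x ∈ idl ∧ P x := by
      intro x hx
      rcases List.mem_append.mp hx with hx | hx
      · exact hq x (by simp [hx])
      · exact ⟨hnewidl x hx, hnewP x hx⟩
    have hqnd' : ((rest ++ new).map Int.toNat).Nodup := by
      rw [List.map_append, List.nodup_append]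
      refine ⟨hrestnd.1, n5, ?_⟩
      intro a ha b hb
      obtain ⟨x, hx, rfl⟩ := List.mem_map.mp ha
      obtain ⟨c, hc, hceq⟩ := List.mem_map.mp hb
      intro heq
      have h1 : check.getD x.toNat false = true := hqm x (by simp [hx])
      have h2 : check.getD c.toNat false = false := (n4 c hc).2
      rw [hceq, ← heq, h1] at h2
      cases h2
    have hqm' : ∀ x ∈ rest ++ new,
        (List.foldl bfsStepA (check, rest) (PySem.List.pyGetD graph now [])).1.getD x.toNat false = true := by
      intro x hx
      rcases List.mem_append.mp hx with hx | hx
      · exact (n3 x.toNat).mpr (Or.inl (hqm x (by simp [hx])))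
      · exact (n3 x.toNat).mpr (Or.inr (List.mem_map_of_mem hx))
    have hcl' : ∀ v ∈ idl,
        (List.foldl bfsStepA (check, rest) (PySem.List.pyGetD graph now [])).1.getD v.toNat false = true →
        v.toNat ∉ (rest ++ new).map Int.toNat →
        ∀ c, (v, c) ∈ edges →
        (List.foldl bfsStepA (check, rest) (PySem.List.pyGetD graph now [])).1.getD c.toNat false = true := by
      intro v hv hm hnq c hec
      rw [List.map_append] at hnq
      have hnrest : v.toNat ∉ rest.map Int.toNat := fun h => hnq (List.mem_append_left _ h)
      have hnnew : v.toNat ∉ new.map Int.toNat := fun h => hnq (List.mem_append_right _ h)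
      rcases (n3 v.toNat).mp hm with hold | hnew
      · by_cases hvnow : v.toNat = now.toNat
        · have hveq : v = now := by
            have h1 := hidl0 v hv
            have h2 := hidl0 now hnowidl
            omega
          subst hveq
          exact n6 c ((hgraph v hv c).mpr hec)
        · have hnq0 : v.toNat ∉ (now :: rest).map Int.toNat := by
            simp only [List.map_cons, List.mem_cons]
            push_neg
            exact ⟨hvnow, hnrest⟩
          exact (n3 c.toNat).mpr (Or.inl (hcl v hv hold hnq0 c hec))
      · exact absurd hnew hnnew
    have hup' : ∀ j,
        (List.foldl bfsStepA (check, rest) (PySem.List.pyGetD graph now [])).1.getD j false = true →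
        ∃ v ∈ idl, P v ∧ v.toNat = j := by
      intro j hj
      rcases (n3 j).mp hj with hold | hnew
      · exact hup j hold
      · obtain ⟨c, hc, rfl⟩ := List.mem_map.mp hnew
        exact ⟨c, hnewidl c hc, hnewP c hc, rfl⟩
    have hlen' : (List.foldl bfsStepA (check, rest) (PySem.List.pyGetD graph now [])).1.length = N := by
      rw [n2, hlen]
    rw [n1] at ih
    obtain ⟨i1, i2, i3, i4, i5⟩ := ih hlen' hq' hqnd' hqm' hcl' hup'
    rw [show bfsA graph numbers (now :: rest) check res = bfsA graph numbers
        (List.foldl bfsStepA (check, rest) (PySem.List.pyGetD graph now [])).2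
        (List.foldl bfsStepA (check, rest) (PySem.List.pyGetD graph now [])).1
        (res + PySem.List.pyGetD numbers now 0) from by simp only [bfsA]]
    rw [n1]
    refine ⟨i1, ?_, i3, i4, ?_⟩
    · intro j hj
      exact i2 j ((n3 j).mpr (Or.inl hj))
    · rw [i5, hnum now hnowidl, n7]
      rw [List.map_append, List.sum_append, List.map_cons, List.sum_cons]
      ring
-- ## A's outer loop over the names dict, characterised

theorem matchIds_append (keyword : String) (pr : List (List String)) (r : List String) :
    matchIds keyword (pr ++ [r]) =
      matchIds keyword pr ++ (if PySem.Str.isIn keyword (rname r) then [rid r] else []) := by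
  simp only [matchIds, List.filter_append, List.map_append]
  congr 1
  by_cases hm : PySem.Str.isIn keyword (rname r) = true <;>
    simp only [PySem.Str.isIn] at hm <;> simp [hm]

theorem reachR_mono (edges : List (Int × Int)) (S T : List Int) (hST : ∀ s ∈ S, s ∈ T)
    (v : Int) (h : ReachR edges S v) : ReachR edges T v := by
  obtain ⟨s, hs, hrtg⟩ := h
  exact ⟨s, hST s hs, hrtg⟩

theorem reachR_append_redundant (edges : List (Int × Int)) (S : List Int) (s : Int)
    (hS : ReachR edges S s) (v : Int) :
    ReachR edges (S ++ [s]) v ↔ ReachR edges S v := by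
  constructor
  · rintro ⟨t, ht, hrtg⟩
    rcases List.mem_append.mp ht with ht | ht
    · exact ⟨t, ht, hrtg⟩
    · obtain ⟨u, hu, hrtg'⟩ := hS
      have : t = s := by simpa using ht
      subst this
      exact ⟨u, hu, hrtg'.trans hrtg⟩
  · exact reachR_mono edges S (S ++ [s]) (fun t ht => List.mem_append_left _ ht) v

theorem outerA_char (graph : List (List Int)) (numbers : List Int) (w : Nat → Int)
    (idl : List Int) (edges : List (Int × Int)) (N : Nat) (keyword : String)
    (hidl0 : ∀ v ∈ idl, 0 ≤ v) (hidlN : ∀ v ∈ idl, v.toNat < N)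
    (hgraph : ∀ v ∈ idl, ∀ c : Int, c ∈ PySem.List.pyGetD graph v [] ↔ (v, c) ∈ edges)
    (hkidl : ∀ v c : Int, (v, c) ∈ edges → c ∈ idl)
    (hnum : ∀ v ∈ idl, PySem.List.pyGetD numbers v 0 = w v.toNat) :
    ∀ (rem pr : List (List String)) (check : List Bool) (res : Int),
      (∀ r ∈ rem, rid r ∈ idl) →
      (∀ r ∈ pr, rid r ∈ idl) →
      check.length = N →
      res = TS w check →
      (∀ j, check.getD j false = true ↔
        ∃ v ∈ idl, ReachR edges (matchIds keyword pr) v ∧ v.toNat = j) →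
      ((rem.foldl (fun (acc : Int × List Bool) r =>
          if PySem.Str.isIn keyword (rname r) && !(PySem.List.pyGetD acc.2 (rid r) false) then
            ((bfsA graph numbers [rid r] (PySem.List.pySetD acc.2 (rid r) true) acc.1).2,
             (bfsA graph numbers [rid r] (PySem.List.pySetD acc.2 (rid r) true) acc.1).1)
          else acc) (res, check)).2.length = N ∧
       (rem.foldl (fun (acc : Int × List Bool) r =>
          if PySem.Str.isIn keyword (rname r) && !(PySem.List.pyGetD acc.2 (rid r) false) then
            ((bfsA graph numbers [rid r] (PySem.List.pySetD acc.2 (rid r) true) acc.1).2,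
             (bfsA graph numbers [rid r] (PySem.List.pySetD acc.2 (rid r) true) acc.1).1)
          else acc) (res, check)).1 = TS w (rem.foldl (fun (acc : Int × List Bool) r =>
          if PySem.Str.isIn keyword (rname r) && !(PySem.List.pyGetD acc.2 (rid r) false) then
            ((bfsA graph numbers [rid r] (PySem.List.pySetD acc.2 (rid r) true) acc.1).2,
             (bfsA graph numbers [rid r] (PySem.List.pySetD acc.2 (rid r) true) acc.1).1)
          else acc) (res, check)).2 ∧
       (∀ j, (rem.foldl (fun (acc : Int × List Bool) r =>
          if PySem.Str.isIn keyword (rname r) && !(PySem.List.pyGetD acc.2 (rid r) false) then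
            ((bfsA graph numbers [rid r] (PySem.List.pySetD acc.2 (rid r) true) acc.1).2,
             (bfsA graph numbers [rid r] (PySem.List.pySetD acc.2 (rid r) true) acc.1).1)
          else acc) (res, check)).2.getD j false = true ↔
        ∃ v ∈ idl, ReachR edges (matchIds keyword (pr ++ rem)) v ∧ v.toNat = j)) := by
  intro rem
  induction rem with
  | nil =>
    intro pr check res _ hpr hlen hres hchar
    simpa using ⟨hlen, hres, hchar⟩
  | cons r rem' ih =>
    intro pr check res hrem hpr hlen hres hchar
    have hs : rid r ∈ idl := hrem r (by simp)
    have hs0 : 0 ≤ rid r := hidl0 _ hs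
    have hsN : (rid r).toNat < N := hidlN _ hs
    have hread : PySem.List.pyGetD check (rid r) false = check.getD (rid r).toNat false := by
      rw [pyGetD_nonneg_getD check (rid r) false hs0]
    have hrows' : pr ++ r :: rem' = (pr ++ [r]) ++ rem' := by simp
    rw [List.foldl_cons, hrows']
    by_cases hm : PySem.Str.isIn keyword (rname r) = true
    · by_cases hmk : check.getD (rid r).toNat false = true
      · -- already marked: skip, but the new start id is already reachable
        rw [show (if PySem.Str.isIn keyword (rname r) && !(PySem.List.pyGetD check (rid r) false)
            then ((bfsA graph numbers [rid r] (PySem.List.pySetD check (rid r) true) res).2,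
             (bfsA graph numbers [rid r] (PySem.List.pySetD check (rid r) true) res).1)
            else (res, check)) = (res, check) by rw [hread, hmk]; simp]
        refine ih (pr ++ [r]) check res (fun r hr => hrem r (by simp [hr]))
          (fun r' hr' => by rcases List.mem_append.mp hr' with h | h
                            · exact hpr r' h
                            · simp at h; subst h; exact hs) hlen hres ?_
        intro j
        rw [hchar j]
        obtain ⟨v, hv, hvr, hveq⟩ := (hchar (rid r).toNat).mp hmk
        have hveqv : v = rid r := by
          have := hidl0 v hv
          omega
        subst hveqv
        rw [matchIds_append keyword pr r, if_pos hm]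
        constructor
        · rintro ⟨v', hv', hr', he'⟩
          exact ⟨v', hv', (reachR_append_redundant edges _ _ hvr v').mpr hr', he'⟩
        · rintro ⟨v', hv', hr', he'⟩
          exact ⟨v', hv', (reachR_append_redundant edges _ _ hvr v').mp hr', he'⟩
      · -- fresh start: run the BFS
        have hmkf : check.getD (rid r).toNat false = false := by
          cases h : check.getD (rid r).toNat false
          · rfl
          · exact absurd h hmk
        rw [show (if PySem.Str.isIn keyword (rname r) && !(PySem.List.pyGetD check (rid r) false)
            then ((bfsA graph numbers [rid r] (PySem.List.pySetD check (rid r) true) res).2,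
             (bfsA graph numbers [rid r] (PySem.List.pySetD check (rid r) true) res).1)
            else (res, check)) = ((bfsA graph numbers [rid r] (PySem.List.pySetD check (rid r) true) res).2,
             (bfsA graph numbers [rid r] (PySem.List.pySetD check (rid r) true) res).1) by
          rw [hread, hmkf]
          have hmc : PySem.Chars.isIn keyword.toList (rname r).toList = true := by
            simpa [PySem.Str.isIn] using hm
          simp [hmc]]
        have hset : PySem.List.pySetD check (rid r) true = check.set (rid r).toNat true :=
          pySetD_nonneg_set check (rid r) true hs0
        have hslt : (rid r).toNat < check.length := by rw [hlen]; exact hsN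
        have hsmem : rid r ∈ matchIds keyword (pr ++ [r]) := by
          rw [matchIds_append keyword pr r, if_pos hm]
          simp
        have hchar' : ∀ j, (check.set (rid r).toNat true).getD j false = true ↔
            (check.getD j false = true ∨ j = (rid r).toNat) := by
          intro j
          rw [getD_set_true check (rid r).toNat j hslt]
          by_cases hj : j = (rid r).toNat <;> simp [hj]
        have hmatchidl : ∀ pr2 : List (List String), (∀ r' ∈ pr2, rid r' ∈ idl) →
            ∀ t ∈ matchIds keyword pr2, t ∈ idl := by
          intro pr2 hpr2 t ht
          obtain ⟨r', hr', rfl⟩ := List.mem_map.mp ht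
          exact hpr2 r' (List.mem_of_mem_filter hr')
        have hpr1 : ∀ r' ∈ pr ++ [r], rid r' ∈ idl := by
          intro r' hr'
          rcases List.mem_append.mp hr' with h | h
          · exact hpr r' h
          · simp at h; subst h; exact hs
        obtain ⟨o1, o2, o3, o4, o5⟩ := bfsA_main graph numbers w idl edges
          (fun v => ReachR edges (matchIds keyword (pr ++ [r])) v) N hidl0 hidlN hgraph hkidl hnum
          (fun p c hp hpc => by
            obtain ⟨t, ht, hrtg⟩ := hp
            exact ⟨t, ht, hrtg.tail hpc⟩)
          [rid r] (check.set (rid r).toNat true) res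
          (by rw [List.length_set]; exact hlen)
          (by intro x hx; simp only [List.mem_singleton] at hx; subst hx
              exact ⟨hs, ⟨rid r, hsmem, Relation.ReflTransGen.refl⟩⟩)
          (by simp)
          (by intro x hx; simp only [List.mem_singleton] at hx; subst hx
              exact (hchar' (rid r).toNat).mpr (Or.inr rfl))
          (by intro v hv hmkd hnq c hec
              have hvne : v.toNat ≠ (rid r).toNat := by simpa using hnq
              rcases (hchar' v.toNat).mp hmkd with hold | heq
              · obtain ⟨v', hv', hr', he'⟩ := (hchar v.toNat).mp hold
                have hveq : v' = v := by
                  have := hidl0 v hv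
                  have := hidl0 v' hv'
                  omega
                subst hveq
                have hrc : ReachR edges (matchIds keyword pr) c := by
                  obtain ⟨t, ht, g⟩ := hr'
                  exact ⟨t, ht, g.tail hec⟩
                exact (hchar' c.toNat).mpr
                  (Or.inl ((hchar c.toNat).mpr ⟨c, hkidl v' c hec, hrc, rfl⟩))
              · exact absurd heq hvne)
          (by intro j hj
              rcases (hchar' j).mp hj with hold | heq
              · obtain ⟨v, hv, hr', he⟩ := (hchar j).mp hold
                refine ⟨v, hv, reachR_mono edges _ _ ?_ v hr', he⟩
                intro t ht
                rw [matchIds_append keyword pr r, if_pos hm]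
                exact List.mem_append_left _ ht
              · exact ⟨rid r, hs, ⟨rid r, hsmem, Relation.ReflTransGen.refl⟩, heq.symm⟩)
        rw [hset] at *
        have hres' : (bfsA graph numbers [rid r] (check.set (rid r).toNat true) res).2
            = TS w (bfsA graph numbers [rid r] (check.set (rid r).toNat true) res).1 := by
          rw [o5, TS_set w check (rid r).toNat hslt hmkf, hres]
          simp only [List.map_cons, List.map_nil, List.sum_cons, List.sum_nil]
          ring
        have hreach_marked : ∀ v, v ∈ idl →
            ReachR edges (matchIds keyword (pr ++ [r])) v →
            (bfsA graph numbers [rid r] (check.set (rid r).toNat true) res).1.getD v.toNat false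
              = true := by
          intro v hvidl hreach
          obtain ⟨t, ht, rtg⟩ := hreach
          have hbase : (bfsA graph numbers [rid r] (check.set (rid r).toNat true) res).1.getD
              t.toNat false = true ∧ t ∈ idl := by
            rw [matchIds_append keyword pr r, if_pos hm] at ht
            rcases List.mem_append.mp ht with ht | ht
            · have htidl : t ∈ idl := hmatchidl pr hpr t ht
              refine ⟨o2 t.toNat ((hchar' t.toNat).mpr (Or.inl ?_)), htidl⟩
              exact (hchar t.toNat).mpr ⟨t, htidl, ⟨t, ht, Relation.ReflTransGen.refl⟩, rfl⟩
            · have heq : t = rid r := by simpa using ht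
              subst heq
              exact ⟨o2 (rid r).toNat ((hchar' (rid r).toNat).mpr (Or.inr rfl)), hs⟩
          have hstep : ∀ a b : Int, Relation.ReflTransGen (fun p c => (p, c) ∈ edges) a b →
              ((bfsA graph numbers [rid r] (check.set (rid r).toNat true) res).1.getD a.toNat false
                  = true ∧ a ∈ idl) →
              ((bfsA graph numbers [rid r] (check.set (rid r).toNat true) res).1.getD b.toNat false
                  = true ∧ b ∈ idl) := by
            intro a b hab
            induction hab with
            | refl => exact id
            | tail _ hbc ihh =>
              intro h
              have hb := ihh h
              exact ⟨o4 _ hb.2 hb.1 _ hbc, hkidl _ _ hbc⟩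
          exact (hstep t v rtg hbase).1
        refine ih (pr ++ [r])
          (bfsA graph numbers [rid r] (check.set (rid r).toNat true) res).1
          (bfsA graph numbers [rid r] (check.set (rid r).toNat true) res).2
          (fun r' hr' => hrem r' (by simp [hr'])) hpr1 o1 hres' ?_
        intro j
        constructor
        · exact o3 j
        · rintro ⟨v, hvidl, hreach, rfl⟩
          exact hreach_marked v hvidl hreach
    · -- name does not match the keyword
      rw [show (if PySem.Str.isIn keyword (rname r) && !(PySem.List.pyGetD check (rid r) false)
          then ((bfsA graph numbers [rid r] (PySem.List.pySetD check (rid r) true) res).2,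
           (bfsA graph numbers [rid r] (PySem.List.pySetD check (rid r) true) res).1)
          else (res, check)) = (res, check) by rw [Bool.not_eq_true] at hm; rw [hm]; simp]
      refine ih (pr ++ [r]) check res (fun r hr => hrem r (by simp [hr]))
        (fun r' hr' => by rcases List.mem_append.mp hr' with h | h
                          · exact hpr r' h
                          · simp at h; subst h; exact hs) hlen hres ?_
      intro j
      rw [hchar j, matchIds_append keyword pr r, if_neg hm]
      simp

-- ## Glue: sums over the marked set

theorem sum_if_filter (l : List Nat) (p : Nat → Bool) (w : Nat → Int) :
    (l.map (fun j => if p j then w j else 0)).sum = ((l.filter p).map w).sum := by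
  induction l with
  | nil => rfl
  | cons j t ih =>
    simp only [List.map_cons, List.sum_cons, List.filter_cons]
    by_cases hj : p j = true
    · simp [hj, ih]
    · rw [Bool.not_eq_true] at hj; simp [hj, ih]

theorem TS_eq_filter_sum (w : Nat → Int) (check : List Bool) :
    TS w check = (((List.range check.length).filter (fun j => check.getD j false)).map w).sum := by
  unfold TS
  exact sum_if_filter _ _ w

theorem getD_replicate_self {α : Type} (n j : Nat) (x : α) : (List.replicate n x).getD j x = x := by
  simp only [List.getD, List.getElem?_replicate]
  split <;> rfl
theorem final_agree (w : Nat → Int) (idl : List Int) (edges : List (Int × Int)) (S : List Int)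
    (checkF : List Bool) (fin : List Int) (nD : PySem.Dict Int Int) (N : Nat)
    (hlen : checkF.length = N)
    (hchar : ∀ j, checkF.getD j false = true ↔ ∃ v ∈ idl, ReachR edges S v ∧ v.toNat = j)
    (hfin : ∀ v, v ∈ fin ↔ (v ∈ idl ∧ ReachR edges S v))
    (hfnd : fin.Nodup)
    (hidl0 : ∀ v ∈ idl, 0 ≤ v)
    (hidlN : ∀ v ∈ idl, v.toNat < N)
    (hw : ∀ v ∈ fin, nD.getD v 0 = w v.toNat) :
    (if TS w checkF ≠ 0 then TS w checkF else -1)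
      = (if (fin.map (fun i => nD.getD i 0)).sum ≠ 0 then (fin.map (fun i => nD.getD i 0)).sum
         else -1) := by
  have hsum : TS w checkF = (fin.map (fun i => nD.getD i 0)).sum := by
    rw [TS_eq_filter_sum w checkF, hlen]
    have hmapeq : fin.map (fun i => nD.getD i 0) = (fin.map Int.toNat).map w := by
      rw [List.map_map]
      refine List.map_congr_left ?_
      intro v hv
      simp only [Function.comp]
      exact hw v hv
    rw [hmapeq]
    have hnd2 : (fin.map Int.toNat).Nodup := by
      refine List.Nodup.map_on ?_ hfnd
      intro x hx y hy hxy
      have := hidl0 x ((hfin x).mp hx).1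
      have := hidl0 y ((hfin y).mp hy).1
      omega
    have hperm : ((List.range N).filter (fun j => checkF.getD j false)).Perm
        (fin.map Int.toNat) := by
      refine (List.perm_ext_iff_of_nodup (List.Nodup.filter _ List.nodup_range) hnd2).mpr ?_
      intro k
      simp only [List.mem_filter, List.mem_range, List.mem_map]
      constructor
      · rintro ⟨hk, hm⟩
        obtain ⟨v, hvidl, hvr, rfl⟩ := (hchar k).mp hm
        exact ⟨v, (hfin v).mpr ⟨hvidl, hvr⟩, rfl⟩
      · rintro ⟨v, hv, rfl⟩
        obtain ⟨hvidl, hvr⟩ := (hfin v).mp hv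
        exact ⟨hidlN v hvidl, (hchar v.toNat).mpr ⟨v, hvidl, hvr, rfl⟩⟩
    exact (hperm.map w).sum_eq
  rw [hsum]

-- ===== VERDICT (by name: the statement is the Claim_ definition above) =====
set_option maxHeartbeats 1600000 in
theorem solution_spec : Claim_equal_solution := by
  unfold Claim_equal_solution Spec_solution
  intro csv keyword _ hpre
  obtain ⟨hall, hnamend⟩ := hpre
  simp only [solution, solution_alt]
  rw [show (fun l => (PySem.Str.split? l ",").getD []) = rowOf from rfl]
  set L := (PySem.Str.split? csv "\n").getD [] with hLdef
  rw [show PySem.List.slice L (some 1) none = L.drop 1 by simp [pysem]]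
  set n := L.length with hndef
  set rows := (L.drop 1).map rowOf with hrowsdef
  set w := fun j : Nat => lastW rows (j : Int) 0 with hwdef
  set idl := rows.map rid with hidldef
  set edges := edgesOf rows with hedgesdef
  set S := matchIds keyword rows with hSdef
  -- facts from the precondition
  have hok : ∀ r ∈ rows, RowOK n r := fun r hr =>
    (preRowOK_iff n r).mp (List.all_eq_true.mp hall r hr)
  have hnd : (rows.map rname).Nodup := hnamend
  have hLne : L ≠ [] := split_ne_nil csv
  have hrowslen : rows.length = n - 1 ∧ 1 ≤ n := by
    constructor
    · rw [hrowsdef]; simp [hndef]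
    · rw [hndef]; cases hl : L with
      | nil => exact absurd hl hLne
      | cons a t => simp [hl]
  -- id list facts
  have hidl0 : ∀ v ∈ idl, 0 ≤ v := by
    intro v hv
    obtain ⟨r, hr, rfl⟩ := List.mem_map.mp hv
    exact (hok r hr).2.2.1
  have hidlN : ∀ v ∈ idl, v.toNat < n + 1 := by
    intro v hv
    obtain ⟨r, hr, rfl⟩ := List.mem_map.mp hv
    have h1 := (hok r hr).2.2.1
    have h2 := (hok r hr).2.2.2.1
    omega
  have hkidl : ∀ v c : Int, (v, c) ∈ edges → c ∈ idl := by
    intro v c hec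
    rw [hedgesdef] at hec
    unfold edgesOf at hec
    obtain ⟨r, hr, heq⟩ := List.mem_map.mp hec
    cases heq
    exact List.mem_map_of_mem (List.mem_of_mem_filter hr)
  have hmatchsub : ∀ t ∈ S, t ∈ idl := by
    intro t ht
    rw [hSdef] at ht
    obtain ⟨r, hr, rfl⟩ := List.mem_map.mp ht
    exact List.mem_map_of_mem (List.mem_of_mem_filter hr)
  -- ===== A side =====
  obtain ⟨g', nu', hbuild, hglen, hnulen, hnuchar, hgchar⟩ :=
    buildA_char n (L.drop 1)
      (fun x hx => hok (rowOf x) (by rw [hrowsdef]; exact List.mem_map_of_mem hx))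
      PySem.Dict.empty (List.replicate (n + 1) []) (List.replicate (n + 1) (0 : Int))
      (by simp) (by simp)
  simp only [hbuild]
  have hnuchar' : ∀ j : Nat, nu'.getD j 0 = w j := by
    intro j
    rw [hnuchar j, getD_replicate_self]
  have hgchar' : ∀ j : Nat, g'.getD j [] = kidsOf rows (j : Int) := by
    intro j
    rw [hgchar j, getD_replicate_self, List.nil_append]
  have hgraphA : ∀ v ∈ idl, ∀ c : Int, c ∈ PySem.List.pyGetD g' v [] ↔ (v, c) ∈ edges := by
    intro v hv c
    rw [pyGetD_nonneg_getD g' v [] (hidl0 v hv), hgchar' v.toNat,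
      show ((v.toNat : Int)) = v from by have := hidl0 v hv; omega]
    exact mem_kidsOf_iff rows v c
  have hnumA : ∀ v ∈ idl, PySem.List.pyGetD nu' v 0 = w v.toNat := by
    intro v hv
    rw [pyGetD_nonneg_getD nu' v 0 (hidl0 v hv), hnuchar' v.toNat]
  -- the names dict over the rows
  rw [show (L.drop 1).foldl
      (fun d x => PySem.Dict.insert d (rname (rowOf x)) (rid (rowOf x))) PySem.Dict.empty
      = rows.foldl (fun d r => d.insert (rname r) (rid r)) PySem.Dict.empty by
    rw [hrowsdef, List.foldl_map]]
  rw [namesA_keys rows hnd]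
  rw [List.foldl_map]
  have hcongr := PySem.List.foldl_congr_mem
    (l := rows) (init := ((0 : Int), List.replicate (n + 1) false))
    (f := fun (x : Int × List Bool) y =>
      if PySem.Str.isIn keyword (rname y) &&
          !PySem.List.pyGetD x.2 ((List.foldl
            (fun d r => d.insert (rname r) (rid r)) PySem.Dict.empty rows).getD (rname y) 0) false then
        ((bfsA g' nu' [(List.foldl (fun d r => d.insert (rname r) (rid r))
              PySem.Dict.empty rows).getD (rname y) 0]
            (PySem.List.pySetD x.2 ((List.foldl (fun d r => d.insert (rname r) (rid r))
              PySem.Dict.empty rows).getD (rname y) 0) true) x.1).2,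
         (bfsA g' nu' [(List.foldl (fun d r => d.insert (rname r) (rid r))
              PySem.Dict.empty rows).getD (rname y) 0]
            (PySem.List.pySetD x.2 ((List.foldl (fun d r => d.insert (rname r) (rid r))
              PySem.Dict.empty rows).getD (rname y) 0) true) x.1).1)
      else x)
    (g := fun (x : Int × List Bool) y =>
      if PySem.Str.isIn keyword (rname y) && !(PySem.List.pyGetD x.2 (rid y) false) then
        ((bfsA g' nu' [rid y] (PySem.List.pySetD x.2 (rid y) true) x.1).2,
         (bfsA g' nu' [rid y] (PySem.List.pySetD x.2 (rid y) true) x.1).1)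
      else x)
    (by intro acc y hy
        beta_reduce
        rw [namesA_getD rows PySem.Dict.empty y hy hnd])
  rw [hcongr]
  have hTS0 : TS w (List.replicate (n + 1) false) = 0 := by
    unfold TS
    refine List.sum_eq_zero ?_
    intro x hx
    obtain ⟨j, hj, rfl⟩ := List.mem_map.mp hx
    rw [getD_replicate_self]
    rfl
  obtain ⟨a1, a2, a3⟩ := outerA_char g' nu' w idl edges (n + 1) keyword hidl0 hidlN hgraphA
    hkidl hnumA rows []
    (List.replicate (n + 1) false) 0
    (fun r hr => List.mem_map_of_mem hr)
    (by intro r hr; simp at hr)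
    (by simp)
    hTS0.symm
    (by intro j
        rw [getD_replicate_self]
        simp [matchIds, ReachR])
  simp only [List.nil_append] at a3
  rw [a2]
  -- ===== B side =====
  simp only [parseFieldsB_char n rows hok]
  simp only [parseEdgesB_char n rows hok]
  rw [← hedgesdef]
  rw [show (fun (st : PySem.Set Int × Bool) (_ : Int) =>
      if st.2 then st
      else
        let p := edges.foldl passStepB (st.1, false)
        if p.2 then (p.1, false) else (p.1, true)) = (fun st (_ : Int) => outStep edges st) from rfl]
  obtain ⟨i1, i2, i3, i4, i5⟩ := outerB_char edges (fun v => v ∈ idl ∧ ReachR edges S v)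
    (by rintro e he ⟨h1, h2⟩
        refine ⟨hkidl e.1 e.2 he, ?_⟩
        obtain ⟨t, ht, g⟩ := h2
        exact ⟨t, ht, g.tail he⟩)
    (PySem.List.pyRange 0 (n : Int) 1)
    ((rows.map fieldOf).foldl (fun (s : PySem.Set Int) f =>
        if PySem.Str.isIn keyword f.2.1 then PySem.Set.add s f.1 else s) PySem.Set.empty, false)
    (marked0_nodup keyword rows PySem.Set.empty List.nodup_nil)
    (by intro v hv
        have := (marked0_mem keyword rows PySem.Set.empty v).mp hv
        simp only [PySem.Set.empty, List.not_mem_nil, false_or] at this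
        exact ⟨hmatchsub v this, ⟨v, this, Relation.ReflTransGen.refl⟩⟩)
    (by intro h; simp at h)
  have hLr : (PySem.List.pyRange 0 (n : Int) 1).length = n := by simp [pysem]
  have hflag : ((PySem.List.pyRange 0 (n : Int) 1).foldl
      (fun st (_ : Int) => outStep edges st)
      ((rows.map fieldOf).foldl (fun (s : PySem.Set Int) f =>
        if PySem.Str.isIn keyword f.2.1 then PySem.Set.add s f.1 else s) PySem.Set.empty,
        false)).2 = true := by
    rcases i5 with h | h
    · exact h
    · exfalso
      have hsub : ∀ v ∈ ((PySem.List.pyRange 0 (n : Int) 1).foldl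
          (fun st (_ : Int) => outStep edges st)
          ((rows.map fieldOf).foldl (fun (s : PySem.Set Int) f =>
            if PySem.Str.isIn keyword f.2.1 then PySem.Set.add s f.1 else s) PySem.Set.empty,
            false)).1, v ∈ idl := fun v hv => (i3 v hv).1
      have hle := (List.subperm_of_subset i1 hsub).length_le
      have hidll : idl.length = n - 1 := by
        rw [hidldef, List.length_map]; exact hrowslen.1
      rw [hLr] at h
      omega
  have hclosed := i4 hflag
  have hfinmem : ∀ v, v ∈ ((PySem.List.pyRange 0 (n : Int) 1).foldl
      (fun st (_ : Int) => outStep edges st)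
      ((rows.map fieldOf).foldl (fun (s : PySem.Set Int) f =>
        if PySem.Str.isIn keyword f.2.1 then PySem.Set.add s f.1 else s) PySem.Set.empty,
        false)).1 ↔ (v ∈ idl ∧ ReachR edges S v) := by
    intro v
    constructor
    · exact i3 v
    · rintro ⟨hv, hr⟩
      refine reach_sub_closed edges S _ ?_ hclosed v hr
      intro s hs
      exact i2 s ((marked0_mem keyword rows PySem.Set.empty s).mpr (Or.inr hs))
  -- ===== the two results agree =====
  refine final_agree w idl edges S _ _ _ (n + 1) a1 a3 hfinmem i1 hidl0 hidlN ?_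
  intro v hv
  rw [numbersB_getD rows PySem.Dict.empty v]
  have hv0 : 0 ≤ v := hidl0 v ((hfinmem v).mp hv).1
  show lastW rows v ((PySem.Dict.empty : PySem.Dict Int Int).getD v 0) = w v.toNat
  rw [show (PySem.Dict.empty : PySem.Dict Int Int).getD v 0 = 0 from rfl]
  show lastW rows v 0 = lastW rows ((v.toNat : Nat) : Int) 0
  congr 1
  omega
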